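-- pv_equiv track=rewrite | github.com/openview2017/leetcode-group-solution | InterViewQuestions/OA/Amazon/Power consumption/Solution.py | getPowerConsumptions
-- ===== SOURCE A (Python) =====
-- from collections import deque
--
-- def getPowerConsumptions(bootpower, processpower, powerlimit):
--     # Max(bootPower[i...j]) + Sum(processPower[i....j]) * length of subArray.
--     if powerlimit <= 0:
--         return 0
--     max_len = 0
--     left = right = 0
--     monostack = deque([])
--     cur_processPower = 0
--     while right < len(bootpower):
--         if not monostack:
--             total_power = 0
--         else:
--             total_power = bootpower[monostack[0]]+ cur_processPower * (right-left)
--         if total_power <= powerlimit: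
--             max_len = max(max_len, right-left)
--             while monostack and bootpower[monostack[-1]] < bootpower[right]:
--                 monostack.pop()
--             monostack.append(right)
--             cur_processPower += processpower[right]
--             right += 1
--         else:
--             if monostack[0] == left:
--                 monostack.popleft()
--             cur_processPower -= processpower[left]
--             left += 1
--     total_power = bootpower[monostack[0]]+ cur_processPower * (right-left)
--     if total_power <= powerlimit:
--         max_len = max(max_len, right-left)
--     return max_len
-- ===== SOURCE B (Python) =====
-- def getPowerConsumptions(bootpower, processpower, powerlimit):
--     # Same two-pointer window, but no deque: the window's max boot power is
--     # recomputed by a direct scan of the slice each step.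
--     if powerlimit <= 0:
--         return 0
--
--     def window_total(left, right, cur):
--         if left == right:
--             return 0
--         return max(bootpower[left:right]) + cur * (right - left)
--
--     max_len = 0
--     left = right = 0
--     cur = 0
--     n = len(bootpower)
--     while right < n:
--         if window_total(left, right, cur) <= powerlimit:
--             max_len = max(max_len, right - left)
--             cur += processpower[right]
--             right += 1
--         else:
--             cur -= processpower[left]
--             left += 1
--     if window_total(left, right, cur) <= powerlimit:
--         max_len = max(max_len, right - left)
--     return max_len
-- ===== Notes on version B (the rewrite author's own statement) =====
-- stated objective: simpler
-- what changed: The maintained monotonic deque of A is deleted: B keeps the same left/right window and running process-power sum but recomputes the window's max boot power by a direct max() over the slice each step, and the empty window is handled by a plain left==right test instead of deque emptiness.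
import Mathlib
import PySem

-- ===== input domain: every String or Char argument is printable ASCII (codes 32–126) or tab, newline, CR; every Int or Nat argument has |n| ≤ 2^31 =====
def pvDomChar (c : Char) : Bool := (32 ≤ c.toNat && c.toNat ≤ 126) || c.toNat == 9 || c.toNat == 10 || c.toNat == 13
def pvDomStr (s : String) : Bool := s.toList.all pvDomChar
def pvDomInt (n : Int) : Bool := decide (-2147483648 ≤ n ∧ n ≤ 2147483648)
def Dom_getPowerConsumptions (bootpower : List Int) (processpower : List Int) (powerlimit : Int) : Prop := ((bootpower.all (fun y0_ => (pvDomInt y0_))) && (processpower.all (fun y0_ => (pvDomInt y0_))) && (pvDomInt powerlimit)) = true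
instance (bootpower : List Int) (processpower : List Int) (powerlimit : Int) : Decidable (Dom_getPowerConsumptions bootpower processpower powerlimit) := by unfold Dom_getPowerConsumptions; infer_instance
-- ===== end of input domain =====

-- B replaces A's maintained monotonic deque by a direct max-scan of the window each step (objective: simpler).
-- Index accesses are ported with List.getD 0: under Pre_ every index Python reaches is in range, so this is exact
-- (inputs where Python raises IndexError are excluded by Pre_). The while loop is ported with fuel
-- 2*len+1, which is provably sufficient under Pre_ (each iteration increments left or right, both bounded by len).

-- ===== PORT A =====
-- the inner `while monostack and bootpower[monostack[-1]] < bootpower[right]: monostack.pop()` loop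
def popA (boot : List Int) (v : Int) (s : List Nat) : List Nat :=
  if h : s = [] then s
  else if boot.getD (s.getLast h) 0 < v then popA boot v s.dropLast else s
termination_by s.length
decreasing_by
  have := List.length_pos_of_ne_nil h
  simp [List.length_dropLast]; omega

-- the outer `while right < len(bootpower)` loop; state (max_len, left, right, monostack, cur_processPower)
def loopA (boot proc : List Int) (limit : Int) : Nat → Int → Nat → Nat → List Nat → Int → Int × Nat × Nat × List Nat × Int
  | 0, maxLen, left, right, stack, cur => (maxLen, left, right, stack, cur)
  | fuel + 1, maxLen, left, right, stack, cur =>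
    if right < boot.length then
      let total : Int := if stack.isEmpty then 0 else boot.getD (stack.headD 0) 0 + cur * ((right : Int) - (left : Int))
      if total ≤ limit then
        loopA boot proc limit fuel (max maxLen ((right : Int) - (left : Int))) left (right + 1)
          (popA boot (boot.getD right 0) stack ++ [right]) (cur + proc.getD right 0)
      else
        loopA boot proc limit fuel maxLen (left + 1) right
          (if stack.headD 0 = left then stack.tail else stack) (cur - proc.getD left 0)
    else (maxLen, left, right, stack, cur)

def getPowerConsumptions (bootpower : List Int) (processpower : List Int) (powerlimit : Int) : Int :=
  if powerlimit ≤ 0 then 0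
  else
    match loopA bootpower processpower powerlimit (2 * bootpower.length + 1) 0 0 0 [] 0 with
    | (maxLen, left, right, stack, cur) =>
      let total : Int := bootpower.getD (stack.headD 0) 0 + cur * ((right : Int) - (left : Int))
      if total ≤ powerlimit then max maxLen ((right : Int) - (left : Int)) else maxLen

-- ===== PORT B =====
-- `window_total`: 0 for the empty window, else max(bootpower[left:right]) + cur * (right - left)
def windowTotalB (boot : List Int) (left right : Nat) (cur : Int) : Int :=
  if left = right then 0
  else (PySem.List.max? (PySem.List.slice boot (some (left : Int)) (some (right : Int))) (fun y => y)).getD 0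
         + cur * ((right : Int) - (left : Int))

def loopB (boot proc : List Int) (limit : Int) : Nat → Int → Nat → Nat → Int → Int × Nat × Nat × Int
  | 0, maxLen, left, right, cur => (maxLen, left, right, cur)
  | fuel + 1, maxLen, left, right, cur =>
    if right < boot.length then
      if windowTotalB boot left right cur ≤ limit then
        loopB boot proc limit fuel (max maxLen ((right : Int) - (left : Int))) left (right + 1) (cur + proc.getD right 0)
      else
        loopB boot proc limit fuel maxLen (left + 1) right (cur - proc.getD left 0)
    else (maxLen, left, right, cur)

def getPowerConsumptions_alt (bootpower : List Int) (processpower : List Int) (powerlimit : Int) : Int :=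
  if powerlimit ≤ 0 then 0
  else
    match loopB bootpower processpower powerlimit (2 * bootpower.length + 1) 0 0 0 0 with
    | (maxLen, left, right, cur) =>
      if windowTotalB bootpower left right cur ≤ powerlimit then max maxLen ((right : Int) - (left : Int)) else maxLen

-- ===== PRECONDITION & SPEC =====
-- Pre_ excludes exactly the inputs on which Python A raises IndexError: with powerlimit > 0 it indexes
-- monostack[0] of an empty deque when bootpower is empty, and processpower[right]/[left] out of range
-- when processpower is shorter than bootpower.
def Pre_getPowerConsumptions (bootpower : List Int) (processpower : List Int) (powerlimit : Int) : Prop :=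
  powerlimit ≤ 0 ∨ (bootpower ≠ [] ∧ bootpower.length ≤ processpower.length)
instance (bootpower : List Int) (processpower : List Int) (powerlimit : Int) : Decidable (Pre_getPowerConsumptions bootpower processpower powerlimit) := by unfold Pre_getPowerConsumptions; infer_instance

def pvWitness_getPowerConsumptions : List Int × List Int × Int := ([2, 3, 1], [1, 2, 1], 10)

def Spec_getPowerConsumptions (bootpower : List Int) (processpower : List Int) (powerlimit : Int) (out : Int) : Prop := out = getPowerConsumptions_alt bootpower processpower powerlimit
instance (bootpower : List Int) (processpower : List Int) (powerlimit : Int) (out : Int) : Decidable (Spec_getPowerConsumptions bootpower processpower powerlimit out) := by unfold Spec_getPowerConsumptions; infer_instance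

-- ===== CLAIM (what is proved, stated in full; the proofs are below) =====
def Claim_equal_getPowerConsumptions : Prop := ∀ (bootpower : List Int) (processpower : List Int) (powerlimit : Int), Dom_getPowerConsumptions bootpower processpower powerlimit → Pre_getPowerConsumptions bootpower processpower powerlimit → Spec_getPowerConsumptions bootpower processpower powerlimit (getPowerConsumptions bootpower processpower powerlimit)


-- ===== LEMMAS AND PROOFS =====

-- the monotonic deque A maintains for the window [l, r): the indices whose boot value dominates the rest of the window
def pvStack (boot : List Int) (l r : Nat) : List Nat :=
  (List.range' l (r - l)).filter (fun i => decide (∀ j < r, i < j → boot.getD j 0 ≤ boot.getD i 0))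

theorem mem_pvStack {boot : List Int} {l r i : Nat} (hlr : l ≤ r) :
    i ∈ pvStack boot l r ↔ (l ≤ i ∧ i < r ∧ ∀ j < r, i < j → boot.getD j 0 ≤ boot.getD i 0) := by
  simp only [pvStack, List.mem_filter, List.mem_range', decide_eq_true_eq]
  constructor
  · rintro ⟨⟨k, hk, hk2⟩, h3⟩; exact ⟨by omega, by omega, h3⟩
  · rintro ⟨h1, h2, h3⟩; exact ⟨⟨i - l, by omega, by omega⟩, h3⟩

theorem pvStack_self : ∀ (boot : List Int) (l : Nat), pvStack boot l l = [] := by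
  intro boot l; simp [pvStack]

theorem last_mem_pvStack {boot : List Int} {l r : Nat} (hlr : l < r) : r - 1 ∈ pvStack boot l r := by
  rw [mem_pvStack (by omega)]
  exact ⟨by omega, by omega, fun j hj hij => by omega⟩

theorem pvStack_ne_nil {boot : List Int} {l r : Nat} (hlr : l < r) : pvStack boot l r ≠ [] :=
  List.ne_nil_of_mem (last_mem_pvStack hlr)

theorem pvStack_sorted (boot : List Int) (l r : Nat) : (pvStack boot l r).Pairwise (· < ·) :=
  (List.pairwise_lt_range' 1).sublist List.filter_sublist

theorem headD_mem {α : Type} (d : α) {s : List α} (h : s ≠ []) : s.headD d ∈ s := by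
  cases s with
  | nil => exact absurd rfl h
  | cons a t => simp

theorem pvStack_headD_min {boot : List Int} {l r : Nat} {i : Nat} (hi : i ∈ pvStack boot l r) :
    (pvStack boot l r).headD 0 ≤ i := by
  have := pvStack_sorted boot l r
  rcases hs : pvStack boot l r with _ | ⟨a, t⟩
  · rw [hs] at hi; simp at hi
  · rw [hs] at hi this
    simp only [List.headD_cons]
    rcases List.mem_cons.mp hi with h | h
    · omega
    · exact Nat.le_of_lt ((List.pairwise_cons.mp this).1 i h)

-- the head of the stack carries the maximum boot value of the window
theorem pvStack_headD_max {boot : List Int} {l r : Nat} (hlr : l < r) :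
    ∀ j, l ≤ j → j < r → boot.getD j 0 ≤ boot.getD ((pvStack boot l r).headD 0) 0 := by
  set h0 := (pvStack boot l r).headD 0 with hh0
  have hmem : h0 ∈ pvStack boot l r := headD_mem 0 (pvStack_ne_nil hlr)
  have hspec := (mem_pvStack (boot := boot) (by omega : l ≤ r)).mp hmem
  intro j hlj hjr
  -- strong downward induction on r - j
  generalize hd : r - j = d
  induction d using Nat.strong_induction_on generalizing j with
  | _ d ih =>
    by_cases hcase : h0 ≤ j
    · rcases Nat.eq_or_lt_of_le hcase with heq | hlt
      · rw [heq]
      · exact hspec.2.2 j hjr hlt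
    · push_neg at hcase
      -- j < h0, so j is not in the stack, so its window-dominance fails
      have hnot : j ∉ pvStack boot l r := fun hj => absurd (pvStack_headD_min hj) (by omega)
      have hfail : ¬ (∀ k < r, j < k → boot.getD k 0 ≤ boot.getD j 0) := by
        intro hall
        exact hnot ((mem_pvStack (by omega : l ≤ r)).mpr ⟨hlj, hjr, hall⟩)
      push_neg at hfail
      obtain ⟨k, hkr, hjk, hk⟩ := hfail
      have : boot.getD k 0 ≤ boot.getD h0 0 := ih (r - k) (by omega) k (by omega) hkr rfl
      omega

-- B's max-scan of the slice equals the boot value at the stack head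
theorem windowMax_eq {boot : List Int} {l r : Nat} (hlr : l < r) (hrlen : r ≤ boot.length) :
    (PySem.List.max? (PySem.List.slice boot (some (l : Int)) (some (r : Int))) (fun y => y)).getD 0
      = boot.getD ((pvStack boot l r).headD 0) 0 := by
  rw [PySem.List.slice_natCast]
  have hlen : (List.take (r - l) (List.drop l boot)).length = r - l := by
    simp; omega
  have hget : ∀ k (hk : k < (List.take (r - l) (List.drop l boot)).length),
      (List.take (r - l) (List.drop l boot))[k] = boot.getD (l + k) 0 := by
    intro k hk
    have hlk : l + k < boot.length := by simp at hk; omega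
    rw [List.getElem_take, List.getElem_drop, List.getD_eq_getElem _ _ hlk]
  have hne : (List.take (r - l) (List.drop l boot)) ≠ [] := by
    intro h; rw [h] at hlen; simp at hlen; omega
  obtain ⟨m, hm⟩ : ∃ m, PySem.List.max? (List.take (r - l) (List.drop l boot)) (fun y => y) = some m := by
    rcases hmx : PySem.List.max? (List.take (r - l) (List.drop l boot)) (fun y => y) with _ | m
    · exact absurd ((PySem.List.max?_eq_none_iff _ _).mp hmx) hne
    · exact ⟨m, rfl⟩
  rw [hm]; simp only [Option.getD_some]
  -- m is a member of the slice and dominates it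
  have hmmem := PySem.List.max?_mem hm
  have hmmax := PySem.List.max?_isMax hm
  obtain ⟨k, hk, hks⟩ := List.mem_iff_getElem.mp hmmem
  have hh0 := (mem_pvStack (boot := boot) (by omega : l ≤ r)).mp (headD_mem 0 (pvStack_ne_nil (boot := boot) hlr))
  apply le_antisymm
  · -- m = boot value at some window index, ≤ head value
    rw [← hks, hget k hk]
    exact pvStack_headD_max hlr (l + k) (by omega) (by omega)
  · -- head value is in the slice, ≤ m
    have : boot.getD ((pvStack boot l r).headD 0) 0 ∈ List.take (r - l) (List.drop l boot) := by
      rw [List.mem_iff_getElem]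
      refine ⟨(pvStack boot l r).headD 0 - l, by omega, ?_⟩
      rw [hget _ (by omega)]
      congr 1; omega
    exact hmmax _ this

theorem pvStack_pairwise_val (boot : List Int) (l r : Nat) (hlr : l ≤ r) :
    (pvStack boot l r).Pairwise (fun a b : Nat => boot.getD b 0 ≤ boot.getD a 0) := by
  rw [List.pairwise_iff_getElem]
  intro i j hi hj hij
  have hlt := List.pairwise_iff_getElem.mp (pvStack_sorted boot l r) i j hi hj hij
  have hmi := (mem_pvStack (boot := boot) hlr).mp (List.getElem_mem hi)
  have hmj := (mem_pvStack (boot := boot) hlr).mp (List.getElem_mem hj)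
  exact hmi.2.2 _ hmj.2.1 hlt

theorem popA_filter (boot : List Int) (v : Int) :
    ∀ s : List Nat, s.Pairwise (fun a b : Nat => boot.getD b 0 ≤ boot.getD a 0) →
      popA boot v s = s.filter (fun i => decide (v ≤ boot.getD i 0)) := by
  intro s
  induction s using List.reverseRecOn with
  | nil => intro _; simp [popA]
  | append_singleton t a ih =>
    intro hpw
    have hpa := List.pairwise_append.mp hpw
    have hne : t ++ [a] ≠ [] := by simp
    rw [popA, dif_neg hne]
    have hlast : (t ++ [a]).getLast hne = a := by simp
    rw [hlast]
    by_cases hav : boot.getD a 0 < v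
    · rw [if_pos hav, List.dropLast_concat, ih hpa.1, List.filter_append]
      have hfa : (List.filter (fun i => decide (v ≤ boot.getD i 0)) [a]) = [] := by
        simp only [List.filter_cons, List.filter_nil, decide_eq_true_eq]
        rw [if_neg (by omega)]
      rw [hfa, List.append_nil]
    · rw [if_neg hav, List.filter_append]
      have h1 : List.filter (fun i => decide (v ≤ boot.getD i 0)) t = t := by
        rw [List.filter_eq_self]
        intro x hx
        have := hpa.2.2 x hx a (by simp)
        simp only [decide_eq_true_eq]
        omega
      have h2 : (List.filter (fun i => decide (v ≤ boot.getD i 0)) [a]) = [a] := by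
        simp only [List.filter_cons, List.filter_nil, decide_eq_true_eq]
        rw [if_pos (by omega)]
      rw [h1, h2]

theorem pvStack_expand (boot : List Int) (l r : Nat) (hlr : l ≤ r) :
    popA boot (boot.getD r 0) (pvStack boot l r) ++ [r] = pvStack boot l (r + 1) := by
  rw [popA_filter boot _ _ (pvStack_pairwise_val boot l r hlr)]
  have hrange : List.range' l (r + 1 - l) = List.range' l (r - l) ++ [r] := by
    have h1 : r + 1 - l = (r - l) + 1 := by omega
    rw [h1, List.range'_1_concat]
    congr 2; omega
  simp only [pvStack, hrange, List.filter_append, List.filter_filter]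
  congr 1
  · apply List.filter_congr
    intro i hi
    obtain ⟨k, hk, hk2⟩ := List.mem_range'.mp hi
    have hir : i < r := by omega
    rw [Bool.eq_iff_iff]
    simp only [Bool.and_eq_true, decide_eq_true_eq]
    constructor
    · rintro ⟨hq, hp⟩ j hj hij
      by_cases hjr : j = r
      · subst hjr; exact hq
      · exact hp j (by omega) hij
    · intro h
      exact ⟨h r (by omega) hir, fun j hj hij => h j (by omega) hij⟩
  · symm
    rw [List.filter_eq_self]
    intro x hx
    have hx' : x = r := by simpa using hx
    subst hx'
    simp only [decide_eq_true_eq]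
    intro j hj hij; omega

theorem pvStack_shrink (boot : List Int) (l r : Nat) (hlr : l < r) :
    (if (pvStack boot l r).headD 0 = l then (pvStack boot l r).tail else pvStack boot l r)
      = pvStack boot (l + 1) r := by
  have hrange : List.range' l (r - l) = l :: List.range' (l + 1) (r - (l + 1)) := by
    have h1 : r - l = (r - (l + 1)) + 1 := by omega
    rw [h1, List.range'_succ]
  by_cases hp : ∀ j < r, l < j → boot.getD j 0 ≤ boot.getD l 0
  · have hcons : pvStack boot l r = l :: pvStack boot (l + 1) r := by
      simp only [pvStack, hrange, List.filter_cons]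
      rw [if_pos (by simp only [decide_eq_true_eq]; exact hp)]
    rw [hcons]; simp
  · have heq : pvStack boot l r = pvStack boot (l + 1) r := by
      simp only [pvStack, hrange, List.filter_cons]
      rw [if_neg (by simp only [decide_eq_true_eq]; exact hp)]
    have hl1r : l + 1 < r := by
      push_neg at hp
      obtain ⟨j, hjr, hlj, _⟩ := hp
      omega
    have hmem : (pvStack boot (l + 1) r).headD 0 ∈ pvStack boot (l + 1) r :=
      headD_mem 0 (pvStack_ne_nil hl1r)
    have hge := ((mem_pvStack (by omega : l + 1 ≤ r)).mp hmem).1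
    rw [heq]
    simp only [if_neg (by omega : ¬ (pvStack boot (l + 1) r).headD 0 = l)]

def pvPair (boot : List Int) (x : Int × Nat × Nat × Int) : Int × Nat × Nat × List Nat × Int :=
  (x.1, x.2.1, x.2.2.1, pvStack boot x.2.1 x.2.2.1, x.2.2.2)

theorem pvStack_isEmpty_iff {boot : List Int} {l r : Nat} (hlr : l ≤ r) :
    (pvStack boot l r).isEmpty = true ↔ l = r := by
  constructor
  · intro h
    by_contra hne
    exact pvStack_ne_nil (by omega) (List.isEmpty_iff.mp h)
  · intro h; rw [h, pvStack_self]; rfl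

-- the two loops run in lock-step: A's state is B's state plus the stack pvStack of the current window
theorem loop_eq (boot proc : List Int) (limit : Int) (hlim : 0 ≤ limit) :
    ∀ (fuel : Nat) (maxLen : Int) (l r : Nat) (cur : Int), l ≤ r → r ≤ boot.length →
      loopA boot proc limit fuel maxLen l r (pvStack boot l r) cur
        = pvPair boot (loopB boot proc limit fuel maxLen l r cur) := by
  intro fuel
  induction fuel with
  | zero => intro maxLen l r cur _ _; simp [loopA, loopB, pvPair]
  | succ fuel ih =>
    intro maxLen l r cur hlr hrlen
    rw [loopA, loopB]
    by_cases hr : r < boot.length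
    · simp only [hr, if_true]
      have htot : (if (pvStack boot l r).isEmpty then (0 : Int)
            else boot.getD ((pvStack boot l r).headD 0) 0 + cur * ((r : Int) - (l : Int)))
          = windowTotalB boot l r cur := by
        unfold windowTotalB
        by_cases hle : l = r
        · simp [hle, pvStack_self]
        · have hlt : l < r := by omega
          rw [if_neg ((fun h => hle ((pvStack_isEmpty_iff hlr).mp h)) : ¬ (pvStack boot l r).isEmpty = true),
              if_neg hle, windowMax_eq hlt (by omega)]
      rw [htot]
      by_cases hcond : windowTotalB boot l r cur ≤ limit
      · simp only [hcond, if_true]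
        rw [pvStack_expand boot l r hlr]
        exact ih _ l (r + 1) _ (by omega) (by omega)
      · simp only [hcond, if_false]
        have hlt : l < r := by
          rcases Nat.lt_or_ge l r with h | h
          · exact h
          · exfalso
            have hle : l = r := by omega
            apply hcond
            unfold windowTotalB
            simp [hle]; omega
        rw [pvStack_shrink boot l r hlt]
        exact ih _ (l + 1) r _ (by omega) hrlen
    · simp [hr, pvPair]

-- with fuel ≥ 2*len, B's loop exits with right = len, and left < right whenever the list is nonempty
theorem loopB_exit (boot proc : List Int) (limit : Int) (hlim : 0 ≤ limit) :
    ∀ (fuel : Nat) (maxLen : Int) (l r : Nat) (cur : Int), l ≤ r → r ≤ boot.length →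
      2 * boot.length ≤ fuel + l + r → (r < boot.length ∨ l < r ∨ boot.length = 0) →
      (loopB boot proc limit fuel maxLen l r cur).2.2.1 = boot.length ∧
      (0 < boot.length → (loopB boot proc limit fuel maxLen l r cur).2.1
          < (loopB boot proc limit fuel maxLen l r cur).2.2.1) := by
  intro fuel
  induction fuel with
  | zero =>
    intro maxLen l r cur hlr hrlen hfuel hside
    have h1 : l = boot.length ∧ r = boot.length := by omega
    simp only [loopB]
    refine ⟨h1.2, ?_⟩
    intro hpos
    omega
  | succ fuel ih =>
    intro maxLen l r cur hlr hrlen hfuel hside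
    rw [loopB]
    by_cases hr : r < boot.length
    · simp only [hr, if_true]
      by_cases hcond : windowTotalB boot l r cur ≤ limit
      · simp only [hcond, if_true]
        exact ih _ l (r + 1) _ (by omega) (by omega) (by omega) (by omega)
      · simp only [hcond, if_false]
        have hlt : l < r := by
          rcases Nat.lt_or_ge l r with h | h
          · exact h
          · exfalso
            have hle : l = r := by omega
            apply hcond
            unfold windowTotalB
            simp [hle]; omega
        exact ih _ (l + 1) r _ (by omega) hrlen (by omega) (by omega)
    · simp only [hr, if_false]
      exact ⟨by omega, by omega⟩

-- ===== VERDICT (by name: the statement is the Claim_ definition above) =====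
theorem getPowerConsumptions_spec : Claim_equal_getPowerConsumptions := by
  intro boot proc limit _ hpre
  unfold Spec_getPowerConsumptions getPowerConsumptions getPowerConsumptions_alt
  by_cases hlim : limit ≤ 0
  · simp [hlim]
  · simp only [hlim, if_false]
    have hlim' : (0 : Int) ≤ limit := by omega
    have hpre' : boot ≠ [] ∧ boot.length ≤ proc.length := by
      rcases hpre with h | h
      · exact absurd h hlim
      · exact h
    have hpos : 0 < boot.length := List.length_pos_of_ne_nil hpre'.1
    have hstack0 : pvStack boot 0 0 = [] := pvStack_self boot 0
    have hmain := loop_eq boot proc limit hlim' (2 * boot.length + 1) 0 0 0 0 (by omega) (by omega)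
    rw [hstack0] at hmain
    have hexit := loopB_exit boot proc limit hlim' (2 * boot.length + 1) 0 0 0 0 (by omega) (by omega)
      (by omega) (by omega)
    rcases hB : loopB boot proc limit (2 * boot.length + 1) 0 0 0 0 with ⟨m, l', r', c'⟩
    rw [hB] at hmain hexit
    simp only at hexit
    have hr' : r' = boot.length := hexit.1
    have hlr' : l' < r' := hexit.2 hpos
    rw [hmain]
    simp only [pvPair]
    have htot : boot.getD ((pvStack boot l' r').headD 0) 0 + c' * ((r' : Int) - (l' : Int))
        = windowTotalB boot l' r' c' := by
      unfold windowTotalB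
      rw [if_neg (by omega : ¬ l' = r'), windowMax_eq hlr' (by omega)]
    rw [htot]
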